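-- pv_equiv track=rewrite | github.com/lexziconAI/cca-profiler | ccip/ccip_compose.py | format_body_to_three_lines
-- ===== SOURCE A (Python) =====
-- def format_body_to_three_lines(text: str) -> str:
--     """Convert paragraph to exactly 3 lines by splitting on sentence/semicolon boundaries."""
--     if not text:
--         return ""
--
--     # Split on sentence endings and semicolons
--     segments = []
--     current = ""
--
--     for char in text:
--         current += char
--         if char in '.;' and current.strip():
--             segments.append(current.strip())
--             current = ""
--
--     # Add any remaining text
--     if current.strip():
--         segments.append(current.strip())
--
--     # Take first three segments, pad if needed
--     while len(segments) < 3: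
--         segments.append("")
--
--     return "\n".join(segments[:3])
-- ===== SOURCE B (Python) =====
-- def format_body_to_three_lines(text: str) -> str:
--     """Convert paragraph to exactly 3 lines by splitting on sentence/semicolon boundaries.
--
--     Early-stopping rewrite: only the first three segments are ever needed, so scan
--     segment by segment and stop as soon as three are collected, instead of
--     accumulating every segment of the whole text char by char.
--     """
--     if not text:
--         return ""
--
--     segs = []
--     rest = text
--     while len(segs) < 3 and rest:
--         i = 0
--         while i < len(rest) and rest[i] not in '.;':
--             i += 1
--         if i == len(rest):
--             t = rest.strip()
--             if t:
--                 segs.append(t)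
--             rest = ""
--         else:
--             segs.append(rest[:i + 1].strip())
--             rest = rest[i + 1:]
--
--     return "\n".join(segs + [""] * (3 - len(segs)))
-- ===== Notes on version B (the rewrite author's own statement) =====
-- stated objective: alternative
-- what changed: Instead of accumulating every segment of the whole text char by char into a growing string, B scans segment by segment (jump to the next '.'/';' and slice) and stops as soon as the three needed segments are collected.
import Mathlib
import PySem

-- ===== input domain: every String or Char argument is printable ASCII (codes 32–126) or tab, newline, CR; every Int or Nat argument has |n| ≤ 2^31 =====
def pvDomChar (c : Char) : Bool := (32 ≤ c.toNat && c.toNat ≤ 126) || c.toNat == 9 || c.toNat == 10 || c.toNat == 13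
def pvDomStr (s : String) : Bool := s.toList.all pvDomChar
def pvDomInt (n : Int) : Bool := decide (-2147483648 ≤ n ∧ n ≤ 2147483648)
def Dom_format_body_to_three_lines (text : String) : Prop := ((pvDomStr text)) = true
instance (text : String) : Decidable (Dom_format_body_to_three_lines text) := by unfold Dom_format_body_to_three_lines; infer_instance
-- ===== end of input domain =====

-- B stops scanning once three segments are found instead of accumulating every
-- segment of the whole text char by char (objective: alternative decomposition).

-- ===== PORT A =====
-- one step of A's `for char in text` loop: state = (segments, current)
def fbA_step (st : List (List Char) × List Char) (c : Char) : List (List Char) × List Char :=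
  if (c = '.' || c = ';') && !(PySem.Chars.strip (st.2 ++ [c])).isEmpty then
    (st.1 ++ [PySem.Chars.strip (st.2 ++ [c])], [])
  else
    (st.1, st.2 ++ [c])

-- A's `while len(segments) < 3: segments.append("")`
def fbA_pad (segs : List (List Char)) : List (List Char) :=
  if segs.length < 3 then fbA_pad (segs ++ [[]]) else segs
termination_by 3 - segs.length
decreasing_by simp_all; omega

def format_body_to_three_lines (text : String) : String :=
  if text.toList = [] then "" else
  let st := text.toList.foldl fbA_step ([], [])
  let segs := if !(PySem.Chars.strip st.2).isEmpty then st.1 ++ [PySem.Chars.strip st.2] else st.1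
  String.ofList (PySem.Chars.join ['\n'] ((fbA_pad segs).take 3))

-- ===== PORT B =====
def pvDelim (c : Char) : Bool := c = '.' || c = ';'

-- B's `while len(segs) < 3 and rest` loop; k = 3 - len(segs) is the fuel.
-- The inner index scan to the first delimiter is the takeWhile/dropWhile split.
def fbB_segs (k : Nat) (rest : List Char) : List (List Char) :=
  match k with
  | 0 => []
  | k + 1 =>
    if rest = [] then [] else
    match rest.dropWhile (fun c => !pvDelim c) with
    | [] =>
      if PySem.Chars.strip (rest.takeWhile (fun c => !pvDelim c)) = [] then []
      else [PySem.Chars.strip (rest.takeWhile (fun c => !pvDelim c))]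
    | d :: rest' => PySem.Chars.strip (rest.takeWhile (fun c => !pvDelim c) ++ [d]) :: fbB_segs k rest'

def format_body_to_three_lines_alt (text : String) : String :=
  if text.toList = [] then "" else
  let segs := fbB_segs 3 text.toList
  String.ofList (PySem.Chars.join ['\n'] (segs ++ List.replicate (3 - segs.length) []))

-- ===== PRECONDITION & SPEC =====
def Spec_format_body_to_three_lines (text : String) (out : String) : Prop := out = format_body_to_three_lines_alt text
instance (text : String) (out : String) : Decidable (Spec_format_body_to_three_lines text out) := by unfold Spec_format_body_to_three_lines; infer_instance

-- ===== CLAIM (what is proved, stated in full; the proofs are below) =====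
def Claim_equal_format_body_to_three_lines : Prop := ∀ (text : String), Dom_format_body_to_three_lines text → Spec_format_body_to_three_lines text (format_body_to_three_lines text)

-- ===== LEMMAS AND PROOFS =====

-- recursive characterisation of A's loop result (segments incl. tail handling)
def segA (cur : List Char) : List Char → List (List Char)
  | [] => if (PySem.Chars.strip cur).isEmpty then [] else [PySem.Chars.strip cur]
  | c :: rest =>
    if (c = '.' || c = ';') && !(PySem.Chars.strip (cur ++ [c])).isEmpty then
      PySem.Chars.strip (cur ++ [c]) :: segA [] rest
    else
      segA (cur ++ [c]) rest

lemma segA_cons (cur : List Char) (c : Char) (rest : List Char) :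
    segA cur (c :: rest) =
      if (c = '.' || c = ';') && !(PySem.Chars.strip (cur ++ [c])).isEmpty then
        PySem.Chars.strip (cur ++ [c]) :: segA [] rest
      else segA (cur ++ [c]) rest := rfl

lemma strip_append_nonspace (cs : List Char) (c : Char) (hc : PySem.Chars.isspace c = false) :
    PySem.Chars.strip (cs ++ [c]) = PySem.Chars.lstrip cs ++ [c] := by
  have h1 : PySem.Chars.lstrip (cs ++ [c]) = PySem.Chars.lstrip cs ++ [c] := by
    simp only [PySem.Chars.lstrip, List.dropWhile_append]
    split_ifs with h
    · simp only [List.isEmpty_iff] at h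
      rw [h]
      simp [hc]
    · rfl
  have h2 : PySem.Chars.rstrip (PySem.Chars.lstrip cs ++ [c]) = PySem.Chars.lstrip cs ++ [c] := by
    simp [PySem.Chars.rstrip, hc]
  rw [PySem.Chars.strip, h1, h2]

lemma strip_append_delim_ne_nil (cs : List Char) (c : Char) (hc : pvDelim c = true) :
    PySem.Chars.strip (cs ++ [c]) ≠ [] := by
  have hsp : PySem.Chars.isspace c = false := by
    simp only [pvDelim, Bool.or_eq_true, decide_eq_true_eq] at hc
    rcases hc with h | h <;> subst h <;> decide
  rw [strip_append_nonspace cs c hsp]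
  simp

lemma foldl_segA (s : List Char) : ∀ (segs : List (List Char)) (cur : List Char),
    (if !(PySem.Chars.strip (s.foldl fbA_step (segs, cur)).2).isEmpty
     then (s.foldl fbA_step (segs, cur)).1 ++ [PySem.Chars.strip (s.foldl fbA_step (segs, cur)).2]
     else (s.foldl fbA_step (segs, cur)).1)
    = segs ++ segA cur s := by
  induction s with
  | nil =>
    intro segs cur
    simp only [List.foldl_nil, segA]
    split_ifs with h <;> simp_all
  | cons c rest ih =>
    intro segs cur
    rw [List.foldl_cons]
    by_cases h : ((c = '.' || c = ';') && !(PySem.Chars.strip (cur ++ [c])).isEmpty) = true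
    · have hstep : fbA_step (segs, cur) c = (segs ++ [PySem.Chars.strip (cur ++ [c])], []) := by
        simp only [fbA_step]
        rw [if_pos h]
      rw [hstep, ih]
      rw [segA_cons, if_pos h, List.append_assoc]
      rfl
    · have hstep : fbA_step (segs, cur) c = (segs, cur ++ [c]) := by
        simp only [fbA_step]
        rw [if_neg h]
      rw [hstep, ih]
      rw [segA_cons, if_neg h]

lemma segs_take (s : List Char) : ∀ (k : Nat) (cur : List Char),
    (∀ c ∈ cur, pvDelim c = false) →
    fbB_segs k (cur ++ s) = (segA cur s).take k := by
  induction s with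
  | nil =>
    intro k cur hcur
    match k with
    | 0 => simp [fbB_segs]
    | k + 1 =>
      by_cases h : cur = []
      · subst h
        simp [fbB_segs, segA, PySem.Chars.strip, PySem.Chars.lstrip, PySem.Chars.rstrip]
      · have hta : cur.takeWhile (fun x => !pvDelim x) = cur :=
          List.takeWhile_eq_self_iff.mpr (fun a ha => by rw [hcur a ha]; rfl)
        have hdr : cur.dropWhile (fun x => !pvDelim x) = [] :=
          List.dropWhile_eq_nil_iff.mpr (fun a ha => by rw [hcur a ha]; rfl)
        rw [List.append_nil, fbB_segs.eq_def]
        simp only [hdr, hta]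
        rw [if_neg h]
        rw [segA.eq_def]
        simp only [List.isEmpty_iff]
        split_ifs <;> simp
  | cons c rest ih =>
    intro k cur hcur
    match k with
    | 0 => simp [fbB_segs]
    | k + 1 =>
      have hta : cur.takeWhile (fun x => !pvDelim x) = cur :=
        List.takeWhile_eq_self_iff.mpr (fun a ha => by rw [hcur a ha]; rfl)
      have hdr : cur.dropWhile (fun x => !pvDelim x) = [] :=
        List.dropWhile_eq_nil_iff.mpr (fun a ha => by rw [hcur a ha]; rfl)
      by_cases hc : pvDelim c = true
      · have hsplit_t : (cur ++ c :: rest).takeWhile (fun x => !pvDelim x) = cur := by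
          rw [List.takeWhile_append, if_pos (by rw [hta])]
          rw [List.takeWhile_cons_of_neg (by simp [hc])]
          simp
        have hsplit_d : (cur ++ c :: rest).dropWhile (fun x => !pvDelim x) = c :: rest := by
          rw [List.dropWhile_append, if_pos (by rw [hdr]; rfl)]
          rw [List.dropWhile_cons_of_neg (by simp [hc])]
        have hcond : ((c = '.' || c = ';') && !(PySem.Chars.strip (cur ++ [c])).isEmpty) = true := by
          have hne := strip_append_delim_ne_nil cur c hc
          simp only [pvDelim, Bool.or_eq_true, decide_eq_true_eq] at hc
          simp only [Bool.and_eq_true, Bool.or_eq_true, decide_eq_true_eq, Bool.not_eq_true']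
          exact ⟨hc, by simp [hne]⟩
        rw [fbB_segs.eq_def]
        simp only [hsplit_d, hsplit_t]
        rw [if_neg (by simp)]
        rw [segA_cons, if_pos hcond, List.take_succ_cons]
        have := ih k [] (by simp)
        rw [List.nil_append] at this
        rw [this]
      · have hc' : pvDelim c = false := by simpa using hc
        have hcond : ((c = '.' || c = ';') && !(PySem.Chars.strip (cur ++ [c])).isEmpty) = false := by
          simp only [pvDelim] at hc'
          simp only [Bool.and_eq_false_iff, Bool.or_eq_false_iff, decide_eq_false_iff_not]
          left
          constructor
          · intro h; exact absurd (Or.inl h) (by simpa using hc')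
          · intro h; exact absurd (Or.inr h) (by simpa using hc')
        rw [segA_cons, if_neg (by simp [hcond])]
        have happ : cur ++ c :: rest = (cur ++ [c]) ++ rest := by simp
        rw [happ]
        exact ih (k + 1) (cur ++ [c]) (by
          intro a ha
          rcases List.mem_append.mp ha with h | h
          · exact hcur a h
          · simp only [List.mem_singleton] at h; subst h; exact hc')

lemma pad_take_three (P : List (List Char)) :
    (fbA_pad P).take 3 = P.take 3 ++ List.replicate (3 - (P.take 3).length) [] := by
  match P with
  | [] => rw [fbA_pad]; rw [fbA_pad]; rw [fbA_pad]; rw [fbA_pad]; simp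
  | [a] => rw [fbA_pad]; rw [fbA_pad]; rw [fbA_pad]; simp
  | [a, b] => rw [fbA_pad]; rw [fbA_pad]; simp
  | a :: b :: c :: r =>
    rw [fbA_pad, if_neg (by simp only [List.length_cons]; omega)]
    simp [List.take_succ_cons]

-- ===== VERDICT (by name: the statement is the Claim_ definition above) =====
theorem format_body_to_three_lines_spec : Claim_equal_format_body_to_three_lines := by
  intro text _
  unfold Spec_format_body_to_three_lines format_body_to_three_lines format_body_to_three_lines_alt
  by_cases h : text.toList = []
  · simp [h]
  · rw [if_neg h, if_neg h]
    dsimp only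
    have hA := foldl_segA text.toList [] []
    rw [List.nil_append] at hA
    rw [hA]
    have hB : fbB_segs 3 text.toList = (segA [] text.toList).take 3 := by
      have := segs_take text.toList 3 [] (by simp)
      rwa [List.nil_append] at this
    rw [hB, ← pad_take_three]
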